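-- pv_equiv track=rewrite | github.com/cirofabianbermudez/sistemas_evolutivos | Clases/Clase9/Nodominados/dominancia.py | dominancia
-- ===== SOURCE A (Python) =====
-- def dominancia( m, a, b ) :
-- 	flag1 = 0
-- 	flag2 = 0
-- 	i = 0
-- 	while i < m :
-- 		if a[i] < b[i] :
-- 			flag1 = 1
-- 		elif a[i] > b[i] :
-- 			flag2 = 1
-- 		i += 1
--
-- 	if flag1==1 and flag2==0 :
-- 		return 1
-- 	elif flag1==0 and flag2==1 :
-- 		return -1
-- 	else :
-- 		return 0
-- ===== SOURCE B (Python) =====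
-- def dominancia(m, a, b):
--     idx = range(m)
--     if all(a[i] <= b[i] for i in idx) and any(a[i] < b[i] for i in idx):
--         return 1
--     if all(a[i] >= b[i] for i in idx) and any(a[i] > b[i] for i in idx):
--         return -1
--     return 0
-- ===== Notes on version B (the rewrite author's own statement) =====
-- stated objective: idiomatic
-- what changed: Replaces the single two-flag index loop by direct short-circuiting all/any quantifier scans expressing the Pareto-dominance definition.
import Mathlib
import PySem

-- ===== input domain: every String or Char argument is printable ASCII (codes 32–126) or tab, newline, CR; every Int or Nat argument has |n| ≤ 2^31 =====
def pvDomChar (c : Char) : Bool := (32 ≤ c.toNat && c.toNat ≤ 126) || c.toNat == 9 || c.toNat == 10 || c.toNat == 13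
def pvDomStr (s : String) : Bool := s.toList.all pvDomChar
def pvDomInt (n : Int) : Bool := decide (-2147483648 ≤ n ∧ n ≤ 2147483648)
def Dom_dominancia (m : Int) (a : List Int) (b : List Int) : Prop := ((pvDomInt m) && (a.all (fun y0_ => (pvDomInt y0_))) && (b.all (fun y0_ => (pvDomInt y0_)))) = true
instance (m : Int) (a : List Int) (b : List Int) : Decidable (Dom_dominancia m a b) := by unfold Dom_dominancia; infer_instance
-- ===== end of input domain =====

-- B replaces A's single two-flag index loop by direct all/any quantifier scans (idiomatic; same cost).


-- ===== PORT A =====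
def dominancia (m : Int) (a : List Int) (b : List Int) : Int :=
  let st := (PySem.List.pyRange 0 m 1).foldl (fun (fl : Int × Int) i =>
      if PySem.List.pyGetD a i 0 < PySem.List.pyGetD b i 0 then (1, fl.2)
      else if PySem.List.pyGetD a i 0 > PySem.List.pyGetD b i 0 then (fl.1, 1)
      else fl) ((0 : Int), (0 : Int))
  if st.1 = 1 ∧ st.2 = 0 then 1
  else if st.1 = 0 ∧ st.2 = 1 then -1
  else 0

-- ===== PORT B =====
def dominancia_alt (m : Int) (a : List Int) (b : List Int) : Int :=
  let idx := PySem.List.pyRange 0 m 1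
  if idx.all (fun i => PySem.List.pyGetD a i 0 ≤ PySem.List.pyGetD b i 0)
     && idx.any (fun i => PySem.List.pyGetD a i 0 < PySem.List.pyGetD b i 0) then 1
  else if idx.all (fun i => PySem.List.pyGetD b i 0 ≤ PySem.List.pyGetD a i 0)
     && idx.any (fun i => PySem.List.pyGetD b i 0 < PySem.List.pyGetD a i 0) then -1
  else 0

-- ===== PRECONDITION & SPEC =====
-- Python A indexes a[i], b[i] for every 0 ≤ i < m, so it raises IndexError when m exceeds a length.
def Pre_dominancia (m : Int) (a : List Int) (b : List Int) : Prop :=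
  m ≤ (a.length : Int) ∧ m ≤ (b.length : Int)
instance (m : Int) (a : List Int) (b : List Int) : Decidable (Pre_dominancia m a b) := by
  unfold Pre_dominancia; infer_instance
def pvWitness_dominancia : Int × List Int × List Int := (2, ([1, 2], [1, 3]))
def Spec_dominancia (m : Int) (a : List Int) (b : List Int) (out : Int) : Prop := out = dominancia_alt m a b
instance (m : Int) (a : List Int) (b : List Int) (out : Int) : Decidable (Spec_dominancia m a b out) := by unfold Spec_dominancia; infer_instance

-- ===== CLAIM (what is proved, stated in full; the proofs are below) =====
def Claim_equal_dominancia : Prop := ∀ (m : Int) (a : List Int) (b : List Int), Dom_dominancia m a b → Pre_dominancia m a b → Spec_dominancia m a b (dominancia m a b)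

-- ===== LEMMAS AND PROOFS =====

-- Characterisation of A's loop: each flag ends up 1 exactly when some index satisfies its strict comparison.
theorem dominancia_loop_eq (a b : List Int) (l : List Int) (f1 f2 : Int) :
    l.foldl (fun (fl : Int × Int) i =>
      if PySem.List.pyGetD a i 0 < PySem.List.pyGetD b i 0 then (1, fl.2)
      else if PySem.List.pyGetD a i 0 > PySem.List.pyGetD b i 0 then (fl.1, 1)
      else fl) (f1, f2)
    = ((if l.any (fun i => PySem.List.pyGetD a i 0 < PySem.List.pyGetD b i 0) then 1 else f1),
       (if l.any (fun i => PySem.List.pyGetD b i 0 < PySem.List.pyGetD a i 0) then 1 else f2)) := by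
  induction l generalizing f1 f2 with
  | nil => simp
  | cons x l ih =>
    simp only [List.foldl_cons, List.any_cons]
    by_cases h1 : PySem.List.pyGetD a x 0 < PySem.List.pyGetD b x 0
    · simp only [if_pos h1, ih]
      have h2 : ¬ PySem.List.pyGetD b x 0 < PySem.List.pyGetD a x 0 := by omega
      simp [h1, h2]
    · by_cases h2 : PySem.List.pyGetD b x 0 < PySem.List.pyGetD a x 0
      · simp only [if_neg h1, gt_iff_lt, if_pos h2, ih]
        simp [h1, h2]
      · simp only [if_neg h1, gt_iff_lt, if_neg h2, ih]
        simp [h1, h2]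

-- ===== VERDICT (by name: the statement is the Claim_ definition above) =====
theorem dominancia_spec : Claim_equal_dominancia := by
  intro m a b _ _
  show dominancia m a b = dominancia_alt m a b
  unfold dominancia dominancia_alt
  rw [dominancia_loop_eq]
  set r := PySem.List.pyRange 0 m 1 with hr
  have h3 : (r.all fun i => PySem.List.pyGetD a i 0 ≤ PySem.List.pyGetD b i 0)
      = !(r.any fun i => PySem.List.pyGetD b i 0 < PySem.List.pyGetD a i 0) := by
    have hf : ∀ x : Int, decide (PySem.List.pyGetD a x 0 ≤ PySem.List.pyGetD b x 0)
        = !decide (PySem.List.pyGetD b x 0 < PySem.List.pyGetD a x 0) := fun x => by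
      by_cases h : PySem.List.pyGetD b x 0 < PySem.List.pyGetD a x 0 <;> simp [h] <;> omega
    simp only [hf, List.all_eq_not_any_not, Bool.not_not]
  have h4 : (r.all fun i => PySem.List.pyGetD b i 0 ≤ PySem.List.pyGetD a i 0)
      = !(r.any fun i => PySem.List.pyGetD a i 0 < PySem.List.pyGetD b i 0) := by
    have hf : ∀ x : Int, decide (PySem.List.pyGetD b x 0 ≤ PySem.List.pyGetD a x 0)
        = !decide (PySem.List.pyGetD a x 0 < PySem.List.pyGetD b x 0) := fun x => by
      by_cases h : PySem.List.pyGetD a x 0 < PySem.List.pyGetD b x 0 <;> simp [h] <;> omega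
    simp only [hf, List.all_eq_not_any_not, Bool.not_not]
  by_cases h1 : (r.any fun i => PySem.List.pyGetD a i 0 < PySem.List.pyGetD b i 0) = true <;>
  by_cases h2 : (r.any fun i => PySem.List.pyGetD b i 0 < PySem.List.pyGetD a i 0) = true <;>
  simp [h1, h2, h3, h4]
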